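-- pv_equiv track=rewrite | github.com/avinashtrivedi/Python_Code | part1.py | assign_agents
-- ===== SOURCE A (Python) =====
-- def assign_agents(list1, list2):
--
--     """
--     >>> players = ['Yuri', 'James', 'Huy', 'Siddharth']
--     >>> agents = ['Jett', 'Sage', 'Reyna', 'Viper']
--     >>> assign_agents(players, agents)
--     [['Yuri', 'Jett'], ['James', 'Sage'], ['Huy', 'Reyna'], ['Siddharth', 'Viper']]
--     >>> players = ['James', 'Yuri', 'Huy']
--     >>> agents = ['Jett', 'Jett', 'Viper']
--     >>> assign_agents(players, agents)
--     [['James', 'Jett'], ['Yuri', 'Viper'], ['Huy', 'SPECTATOR']]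
--     >>> players = ['James', 'Yuri', 'Huy']
--     >>> agents = ['Jett', 'Jett', 'Viper', 'Sage']
--     >>> assign_agents(players, agents)
--     [['James', 'Jett'], ['Yuri', 'Viper'], ['Huy', 'Sage']]
--     """
--
--     # get the unique ordered list
--     list2 = list(dict.fromkeys(list2))
--
--     # if size of list1 and list2 is same
--     if len(list1) == len(list2):
--
--         # the list with element wise tuple pair
--         result = list(zip(list1,list2))
--
--     # otherwise
--     else:
--
--         # add 'SPECTATOR' for the extra players
--         list2 = list2 + ['SPECTATOR']* (len(list1)-len(list2))
--
--         # the paired list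
--         result = list(zip(list1,list2))
--
--     # get list of list
--     result = [list(i) for i in result]
--     return result
-- ===== SOURCE B (Python) =====
-- def assign_agents(list1, list2):
--     # fused single pass: no deduplicated list, no padding, no zip.
--     # A cursor walks the raw agent list once; agents already assigned
--     # (tracked in a set) are skipped; when agents run out, 'SPECTATOR'.
--     result = []
--     seen = set()
--     j = 0
--     for p in list1:
--         while j < len(list2) and list2[j] in seen:
--             j += 1
--         if j < len(list2):
--             result.append([p, list2[j]])
--             seen.add(list2[j])
--             j += 1
--         else:
--             result.append([p, 'SPECTATOR'])
--     return result
-- ===== Notes on version B (the rewrite author's own statement) =====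
-- stated objective: alternative
-- what changed: B never builds a deduplicated or padded agent list and has no zip: it is one fused pass over the players with a cursor into the raw agent list and a set of already-assigned agents, skipping repeats on the fly and emitting 'SPECTATOR' once the cursor runs off the end.
import Mathlib
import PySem

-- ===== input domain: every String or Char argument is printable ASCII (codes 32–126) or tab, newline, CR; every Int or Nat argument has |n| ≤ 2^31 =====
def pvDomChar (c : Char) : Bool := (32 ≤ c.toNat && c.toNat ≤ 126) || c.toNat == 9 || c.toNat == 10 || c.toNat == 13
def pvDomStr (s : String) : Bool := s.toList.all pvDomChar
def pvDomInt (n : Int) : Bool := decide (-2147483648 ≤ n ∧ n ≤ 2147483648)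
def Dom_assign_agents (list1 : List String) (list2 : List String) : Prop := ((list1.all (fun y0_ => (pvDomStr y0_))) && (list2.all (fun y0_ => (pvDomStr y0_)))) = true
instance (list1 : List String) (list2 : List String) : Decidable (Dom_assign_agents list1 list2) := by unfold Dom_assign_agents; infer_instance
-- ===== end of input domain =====

-- B is one fused pass over the players with a cursor into the raw agent list and a seen-set,
-- replacing A's dedup/pad/zip staging; objective: alternative (same cost, different algorithm).

-- ===== PORT A =====
def assign_agents (list1 : List String) (list2 : List String) : List (List String) :=
  -- list2 = list(dict.fromkeys(list2))
  let list2' := PySem.List.dedup list2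
  let result :=
    if list1.length = list2'.length then
      list1.zip list2'
    else
      -- list2 = list2 + ['SPECTATOR'] * (len(list1) - len(list2))  (negative count gives [])
      let list2'' := list2' ++ List.replicate (PySem.List.len list1 - PySem.List.len list2').toNat "SPECTATOR"
      list1.zip list2''
  -- result = [list(i) for i in result]
  result.map (fun i => [i.1, i.2])

-- ===== PORT B =====
-- the 'while j < len(list2) and list2[j] in seen: j += 1' loop: advance the cursor past
-- already-assigned agents (the remaining suffix of list2 stands for index j onward)
def pvSkip (seen : PySem.Set String) : List String → List String
  | [] => []
  | a :: rest => if PySem.Set.contains seen a then pvSkip seen rest else a :: rest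

-- the 'for p in list1' loop with state (remaining agent suffix, seen set)
def pvGo : List String → List String → PySem.Set String → List (List String)
  | [], _, _ => []
  | p :: ps, l2, seen =>
    match pvSkip seen l2 with
    | [] => [p, "SPECTATOR"] :: pvGo ps [] seen
    | a :: rest => [p, a] :: pvGo ps rest (PySem.Set.add seen a)

def assign_agents_alt (list1 : List String) (list2 : List String) : List (List String) :=
  pvGo list1 list2 PySem.Set.empty

-- ===== PRECONDITION & SPEC =====
def Spec_assign_agents (list1 : List String) (list2 : List String) (out : List (List String)) : Prop := out = assign_agents_alt list1 list2
instance (list1 : List String) (list2 : List String) (out : List (List String)) : Decidable (Spec_assign_agents list1 list2 out) := by unfold Spec_assign_agents; infer_instance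

-- ===== CLAIM (what is proved, stated in full; the proofs are below) =====
def Claim_equal_assign_agents : Prop := ∀ (list1 : List String) (list2 : List String), Dom_assign_agents list1 list2 → Spec_assign_agents list1 list2 (assign_agents list1 list2)

-- ===== LEMMAS AND PROOFS =====

-- common recursive shape: pair players with agents, 'SPECTATOR' when agents run out
def pvPad : List String → List String → List (List String)
  | [], _ => []
  | x :: xs, [] => [x, "SPECTATOR"] :: pvPad xs []
  | x :: xs, y :: ys => [x, y] :: pvPad xs ys

-- agents of l2 not in seen, first occurrences, in order
def pvFD (seen : PySem.Set String) : List String → List String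
  | [] => []
  | a :: rest =>
    if PySem.Set.contains seen a then pvFD seen rest
    else a :: pvFD (PySem.Set.add seen a) rest

theorem pvFD_skip (seen : PySem.Set String) (l2 : List String) :
    pvFD seen l2 = match pvSkip seen l2 with
      | [] => []
      | a :: rest => a :: pvFD (PySem.Set.add seen a) rest := by
  induction l2 with
  | nil => simp [pvFD, pvSkip]
  | cons a rest ih =>
    by_cases h : a ∈ seen
    · simpa [pvFD, pvSkip, h] using ih
    · simp [pvFD, pvSkip, h]

theorem pvGo_pad (l1 : List String) : ∀ (l2 : List String) (seen : PySem.Set String),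
    pvGo l1 l2 seen = pvPad l1 (pvFD seen l2) := by
  induction l1 with
  | nil => intro l2 seen; simp [pvGo, pvPad]
  | cons p ps ih =>
    intro l2 seen
    rw [pvFD_skip]
    cases h : pvSkip seen l2 with
    | nil => simp [pvGo, h, pvPad, ih, pvFD]
    | cons a rest => simp [pvGo, h, pvPad, ih]

theorem pvFD_foldl (l2 : List String) : ∀ (seen : PySem.Set String),
    seen ++ pvFD seen l2 = l2.foldl PySem.Set.add seen := by
  induction l2 with
  | nil => intro seen; simp [pvFD]
  | cons a rest ih =>
    intro seen
    by_cases h : a ∈ seen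
    · have hadd : PySem.Set.add seen a = seen := by simp [PySem.Set.add, h]
      simp [pvFD, h, List.foldl_cons, ih]
    · have hadd : PySem.Set.add seen a = seen ++ [a] := by simp [PySem.Set.add, h]
      calc seen ++ pvFD seen (a :: rest)
          = (seen ++ [a]) ++ pvFD (PySem.Set.add seen a) rest := by
            simp [pvFD, h]
        _ = List.foldl PySem.Set.add (PySem.Set.add seen a) rest := by rw [hadd] at *; exact ih _
        _ = List.foldl PySem.Set.add seen (a :: rest) := by simp [List.foldl_cons]

theorem pvFD_empty (l2 : List String) : pvFD PySem.Set.empty l2 = PySem.List.dedup l2 := by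
  have := pvFD_foldl l2 PySem.Set.empty
  simpa [PySem.Set.empty, PySem.List.dedup, PySem.Set.ofList] using this

theorem B_eq_pvPad (l1 l2 : List String) :
    assign_agents_alt l1 l2 = pvPad l1 (PySem.List.dedup l2) := by
  unfold assign_agents_alt
  rw [pvGo_pad, pvFD_empty]

theorem pvPad_A (l1 d : List String) :
    (l1.zip (d ++ List.replicate (PySem.List.len l1 - PySem.List.len d).toNat "SPECTATOR")).map
      (fun i => [i.1, i.2]) = pvPad l1 d := by
  induction l1 generalizing d with
  | nil => simp [pvPad]
  | cons x xs ih =>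
    cases d with
    | nil =>
      simp only [PySem.List.len_eq, List.length_cons, List.length_nil]
      simp only [Nat.cast_add, Nat.cast_one, Nat.cast_zero, sub_zero] at *
      rw [show ((xs.length : Int) + 1).toNat = xs.length + 1 by omega]
      simpa [pvPad, List.replicate_succ] using ih []
    | cons y ys =>
      simp only [PySem.List.len_eq, List.length_cons, List.cons_append,
        List.zip_cons_cons, List.map_cons, pvPad]
      have : ((xs.length : Int) + 1 - ((ys.length : Int) + 1)).toNat
           = ((xs.length : Int) - (ys.length : Int)).toNat := by omega
      simpa [this] using ih ys

theorem pvPad_A_eq (l1 d : List String) (h : l1.length = d.length) :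
    (l1.zip d).map (fun i => [i.1, i.2]) = pvPad l1 d := by
  have := pvPad_A l1 d
  simp only [PySem.List.len_eq, h, sub_self, Int.toNat_zero, List.replicate_zero,
    List.append_nil] at this
  exact this

-- ===== VERDICT =====
theorem assign_agents_spec : Claim_equal_assign_agents := by
  intro l1 l2 _
  unfold Spec_assign_agents assign_agents
  rw [B_eq_pvPad]
  simp only [PySem.List.len_eq]
  by_cases h : l1.length = (PySem.List.dedup l2).length
  · rw [if_pos h]; exact pvPad_A_eq l1 (PySem.List.dedup l2) h
  · rw [if_neg h]
    have := pvPad_A l1 (PySem.List.dedup l2)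
    simpa using this
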